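-- pv_equiv track=rewrite | github.com/frederic-junier/DIU | bloc5/RechercheTextuelle/Brigitte/bloc5_TD_rechercheTextuelle_bibi.py | plusLongSuffixePrefixe
-- ===== SOURCE A (Python) =====
-- def plusLongSuffixePrefixe(motif) :
--     """ renvoie une liste contenant l'indice du début du plus long suffixe qui est aussi préfixe dans le sous-motif qui
--     démarre à j+1. S'il n'y en a pas, on écrit 1. On interdit le mot entier. En particulier SP[m-1]=1"""
--     m = len(motif)
--     SP = [1]*m
--     for j in range(m-1) :      #boucle pour remplir SP de0 à m-2 car SP[m-1]=1
--         p = j+1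
--         while p <= m-1 and motif[p:] != motif[:m-p] :      #boucle sur p croissant car plus p est petit, plus le suffixe est long
--             p += 1
--         SP[j] = p
--     return SP                #pour que l'on retourne 1 dans le pire des cas du bonSuffixe
-- ===== SOURCE B (Python) =====
-- def plusLongSuffixePrefixe(motif):
--     """Same table as A, computed right-to-left in one pass: a single
--     suffix-is-prefix test per position plus a running minimum, instead of
--     A's inner while-scan per position."""
--     m = len(motif)
--     if m == 0:
--         return []
--     res = [1]
--     nxt = m
--     for j in range(m - 2, -1, -1):
--         if motif[j+1:] == motif[:m-j-1]:
--             nxt = j + 1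
--         res.append(nxt)
--     res.reverse()
--     return res
-- ===== Notes on version B (the rewrite author's own statement) =====
-- stated objective: faster
-- what changed: A scans p upward from j+1 for every j (inner while over suffix positions, each step a slice comparison); B makes a single right-to-left pass keeping the nearest suffix-start that is also a prefix as a running value, doing exactly one slice comparison per position.
import Mathlib
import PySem

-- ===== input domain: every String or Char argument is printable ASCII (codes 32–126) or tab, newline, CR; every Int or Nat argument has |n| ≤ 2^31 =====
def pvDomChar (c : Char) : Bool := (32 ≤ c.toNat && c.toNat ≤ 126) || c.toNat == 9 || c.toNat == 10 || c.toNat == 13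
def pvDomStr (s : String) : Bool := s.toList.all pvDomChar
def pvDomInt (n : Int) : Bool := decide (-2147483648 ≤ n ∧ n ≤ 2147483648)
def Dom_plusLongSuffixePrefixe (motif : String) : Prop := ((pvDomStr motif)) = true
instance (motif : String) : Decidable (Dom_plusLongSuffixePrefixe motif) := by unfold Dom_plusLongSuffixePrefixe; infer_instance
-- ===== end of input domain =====

-- B computes the same table right-to-left in one pass (one suffix/prefix test per
-- position plus a running minimum) instead of A's inner while-scan per position.


-- ===== PORT A =====
-- inner 'while p <= m-1 and motif[p:] != motif[:m-p]: p += 1' of A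
def pvAWhile (s : List Char) (m : Int) (p : Int) : Int :=
  if h : p ≤ m - 1 ∧ PySem.List.slice s (some p) none ≠ PySem.List.slice s none (some (m - p)) then
    pvAWhile s m (p + 1)
  else p
termination_by (m - p).toNat
decreasing_by omega

def plusLongSuffixePrefixe (motif : String) : List Int :=
  let s := motif.toList
  let m : Int := (PySem.Str.len motif : Int)
  let SP : List Int := List.replicate m.toNat 1
  -- 'SP[j] = p' for j in range(m-1): j is always a valid nonnegative index, so List.set j.toNat is exact
  (PySem.List.pyRange 0 (m - 1) 1).foldl (fun SP j => SP.set j.toNat (pvAWhile s m (j + 1))) SP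

-- ===== PORT B =====
def plusLongSuffixePrefixe_alt (motif : String) : List Int :=
  let s := motif.toList
  let m : Int := (PySem.Str.len motif : Int)
  if m = 0 then []
  else
    let st := (PySem.List.pyRange (m - 2) (-1) (-1)).foldl
      (fun (st : List Int × Int) j =>
        let nxt := if PySem.List.slice s (some (j + 1)) none = PySem.List.slice s none (some (m - j - 1))
                   then j + 1 else st.2
        (st.1 ++ [nxt], nxt)) ([1], m)
    st.1.reverse

-- ===== PRECONDITION & SPEC =====
def Spec_plusLongSuffixePrefixe (motif : String) (out : List Int) : Prop := out = plusLongSuffixePrefixe_alt motif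
instance (motif : String) (out : List Int) : Decidable (Spec_plusLongSuffixePrefixe motif out) := by unfold Spec_plusLongSuffixePrefixe; infer_instance

-- ===== CLAIM (what is proved, stated in full; the proofs are below) =====
def Claim_equal_plusLongSuffixePrefixe : Prop := ∀ (motif : String), Dom_plusLongSuffixePrefixe motif → Spec_plusLongSuffixePrefixe motif (plusLongSuffixePrefixe motif)

-- ===== LEMMAS AND PROOFS =====

-- one unfolding of the while loop when it can still run
theorem pvAWhile_rec (s : List Char) (m p : Int) (h : p ≤ m - 1) :
    pvAWhile s m p =
      if PySem.List.slice s (some p) none = PySem.List.slice s none (some (m - p))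
      then p else pvAWhile s m (p + 1) := by
  rw [pvAWhile]
  by_cases hv : PySem.List.slice s (some p) none = PySem.List.slice s none (some (m - p)) <;>
    simp [h, hv]

theorem pvAWhile_base (s : List Char) (m p : Int) (h : m - 1 < p) : pvAWhile s m p = p := by
  rw [pvAWhile]; simp; omega

-- B's descending fold, characterised: starting with nxt = pvAWhile s m (k+1) and the
-- countdown range (k-1)..0, it appends pvAWhile s m (i+1) for i = k-1 down to 0.
theorem pvBfold (s : List Char) (m : Int) (k : Nat) (hk : (k : Int) ≤ m - 1) (acc : List Int) :
    (PySem.List.pyRange ((k : Int) - 1) (-1) (-1)).foldl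
      (fun (st : List Int × Int) j =>
        let nxt := if PySem.List.slice s (some (j + 1)) none = PySem.List.slice s none (some (m - j - 1))
                   then j + 1 else st.2
        (st.1 ++ [nxt], nxt)) (acc, pvAWhile s m ((k : Int) + 1)) =
    (acc ++ ((PySem.List.pyRange 0 (k : Int) 1).map (fun i => pvAWhile s m (i + 1))).reverse,
     pvAWhile s m 1) := by
  induction k generalizing acc with
  | zero =>
      simp [PySem.List.pyRange_one_eq_nil, PySem.List.pyRange_neg_one_eq_nil]
  | succ k ih =>
      push_cast
      push_cast at hk
      have hcons : PySem.List.pyRange ((k : Int) + 1 - 1) (-1) (-1)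
          = (k : Int) :: PySem.List.pyRange ((k : Int) - 1) (-1) (-1) := by
        have h : ((k : Int) + 1 - 1) = (k : Int) := by ring
        rw [h, PySem.List.pyRange_neg_one_cons (by omega)]
      rw [hcons]
      simp only [List.foldl_cons]
      have hstep : (if PySem.List.slice s (some ((k : Int) + 1)) none
              = PySem.List.slice s none (some (m - (k : Int) - 1))
            then (k : Int) + 1 else pvAWhile s m ((k : Int) + 1 + 1))
          = pvAWhile s m ((k : Int) + 1) := by
        have h1 : ((k : Int) + 1) ≤ m - 1 := by omega
        rw [pvAWhile_rec s m ((k : Int) + 1) h1]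
        have h2 : m - ((k : Int) + 1) = m - (k : Int) - 1 := by ring
        rw [h2]
      rw [hstep]
      have ih' := ih (by omega) (acc ++ [pvAWhile s m ((k : Int) + 1)])
      simp only at ih'
      rw [ih']
      have hrng : PySem.List.pyRange 0 ((k : Int) + 1) 1
          = PySem.List.pyRange 0 (k : Int) 1 ++ [(k : Int)] := by
        rw [PySem.List.pyRange_one_succ_right (by positivity)]
      rw [hrng]
      simp

-- A's fold, characterised: after processing j = 0..k-1 the first k slots hold
-- pvAWhile s m (j+1) and the rest are still 1.
theorem pvAfold (s : List Char) (k : Nat) (hk : k ≤ s.length) :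
    (PySem.List.pyRange 0 (k : Int) 1).foldl
      (fun SP j => SP.set j.toNat (pvAWhile s (s.length : Int) (j + 1)))
      (List.replicate s.length 1) =
    (PySem.List.pyRange 0 (k : Int) 1).map (fun i => pvAWhile s (s.length : Int) (i + 1))
      ++ List.replicate (s.length - k) (1 : Int) := by
  induction k with
  | zero => simp [PySem.List.pyRange_one_eq_nil]
  | succ k ih =>
      push_cast
      have hrng : PySem.List.pyRange 0 ((k : Int) + 1) 1
          = PySem.List.pyRange 0 (k : Int) 1 ++ [(k : Int)] := by
        rw [PySem.List.pyRange_one_succ_right (by positivity)]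
      rw [hrng, List.foldl_append, ih (by omega), List.foldl_cons, List.foldl_nil, List.map_append]
      have hlen : ((PySem.List.pyRange 0 (k : Int) 1).map
          (fun i => pvAWhile s (s.length : Int) (i + 1))).length = k := by
        simp [PySem.List.length_pyRange_one]
      have hrep : List.replicate (s.length - k) (1 : Int)
          = 1 :: List.replicate (s.length - (k + 1)) 1 := by
        have : s.length - k = (s.length - (k + 1)) + 1 := by omega
        rw [this, List.replicate_succ]
      rw [List.set_append, hlen]
      simp [hrep]

-- the equality with the string unfolded to its character list
theorem pvMain (s : List Char) :
    (PySem.List.pyRange 0 ((s.length : Int) - 1) 1).foldl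
      (fun SP j => SP.set j.toNat (pvAWhile s (s.length : Int) (j + 1)))
      (List.replicate s.length (1 : Int)) =
    (if (s.length : Int) = 0 then []
     else
      ((PySem.List.pyRange ((s.length : Int) - 2) (-1) (-1)).foldl
        (fun (st : List Int × Int) j =>
          let nxt := if PySem.List.slice s (some (j + 1)) none
                        = PySem.List.slice s none (some ((s.length : Int) - j - 1))
                     then j + 1 else st.2
          (st.1 ++ [nxt], nxt)) ([1], (s.length : Int))).1.reverse) := by
  by_cases h0 : ((s.length : Int) = 0)
  · have hn : s.length = 0 := by exact_mod_cast h0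
    have hr : PySem.List.pyRange 0 ((s.length : Int) - 1) 1 = [] :=
      PySem.List.pyRange_one_eq_nil (by omega)
    rw [if_pos h0, hr]
    simp only [List.foldl_nil]
    rw [hn]
    rfl
  · rw [if_neg h0]
    have hlen : 1 ≤ s.length := by
      by_contra hc; exact h0 (by omega)
    have hc1 : ((s.length - 1 : Nat) : Int) = (s.length : Int) - 1 := by omega
    -- A side
    have hA := pvAfold s (s.length - 1) (by omega)
    rw [hc1] at hA
    rw [hA]
    -- B side
    have hB := pvBfold s (s.length : Int) (s.length - 1) (by omega) [1]
    simp only at hB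
    rw [hc1] at hB
    have hinit : pvAWhile s (s.length : Int) (((s.length : Int) - 1) + 1)
        = (s.length : Int) := by
      have h : ((s.length : Int) - 1) + 1 = (s.length : Int) := by ring
      rw [h, pvAWhile_base _ _ _ (by omega)]
    have hm2 : ((s.length : Int) - 1) - 1 = (s.length : Int) - 2 := by ring
    rw [hinit, hm2] at hB
    rw [hB]
    have h1 : s.length - (s.length - 1) = 1 := by omega
    rw [h1]
    simp

theorem plusLongSuffixePrefixe_eq (motif : String) :
    plusLongSuffixePrefixe motif = plusLongSuffixePrefixe_alt motif :=
  pvMain motif.toList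

-- ===== VERDICT (by name: the statement is the Claim_ definition above) =====
theorem plusLongSuffixePrefixe_spec : Claim_equal_plusLongSuffixePrefixe := by
  intro motif _
  unfold Spec_plusLongSuffixePrefixe
  exact plusLongSuffixePrefixe_eq motif
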